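-- pv_equiv track=rewrite | github.com/xogusrns123/boggart | video_info_analysis.py | analyze_gop
-- ===== SOURCE A (Python) =====
-- def analyze_gop(frame_info):
--     gop_info = []
--     current_gop = []
--     for frame in frame_info:
--         frame_number, frame_type, frame_size = frame
--         if frame_type == 'I':
--             if current_gop:
--                 gop_info.append(current_gop)
--             current_gop = []
--         current_gop.append((frame_number, frame_type, frame_size))
--     if current_gop:
--         gop_info.append(current_gop)
--     return gop_info
-- ===== SOURCE B (Python) =====
-- def analyze_gop(frame_info):
--     def split_first(rest):
--         # gop = first frame plus following non-I run
--         k = 1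
--         while k < len(rest) and rest[k][1] != 'I':
--             k += 1
--         return rest[:k], rest[k:]
--     gop_info = []
--     rest = frame_info
--     while rest:
--         gop, rest = split_first(rest)
--         gop_info.append(gop)
--     return gop_info
-- ===== Notes on version B (the rewrite author's own statement) =====
-- stated objective: alternative
-- what changed: Replaces A's single foldl with mutable accumulator state (gop_info, current_gop) by a span-based decomposition: repeatedly take the head frame plus the following run of non-I frames as one GOP and recurse on the remainder.
import Mathlib
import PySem

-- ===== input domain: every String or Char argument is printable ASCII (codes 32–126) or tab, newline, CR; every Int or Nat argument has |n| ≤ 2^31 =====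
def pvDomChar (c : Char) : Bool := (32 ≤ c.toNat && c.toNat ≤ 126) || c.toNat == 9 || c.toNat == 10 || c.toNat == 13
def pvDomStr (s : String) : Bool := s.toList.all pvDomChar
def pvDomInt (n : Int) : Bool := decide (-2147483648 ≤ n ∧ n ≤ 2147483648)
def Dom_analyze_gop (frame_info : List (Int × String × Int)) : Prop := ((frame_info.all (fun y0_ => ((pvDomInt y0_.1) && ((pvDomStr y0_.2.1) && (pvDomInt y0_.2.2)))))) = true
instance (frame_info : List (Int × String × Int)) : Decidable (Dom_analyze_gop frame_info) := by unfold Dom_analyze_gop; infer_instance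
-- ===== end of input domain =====

-- B replaces A's foldl over (gop_info, current_gop) state by a span decomposition (head + non-I run, then recurse); same O(n) cost, return value only.

-- ===== PORT A =====
-- one loop step of A: state (gop_info, current_gop), frame unpacked and re-tupled as in Python
def analyzeGopStep (st : List (List (Int × String × Int)) × List (Int × String × Int))
    (frame : Int × String × Int) :
    List (List (Int × String × Int)) × List (Int × String × Int) :=
  let (gop_info, current_gop) := st
  let (frame_number, frame_type, frame_size) := frame
  if frame_type = "I" then
    (if current_gop ≠ [] then gop_info ++ [current_gop] else gop_info,
     [(frame_number, frame_type, frame_size)])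
  else
    (gop_info, current_gop ++ [(frame_number, frame_type, frame_size)])

def analyze_gop (frame_info : List (Int × String × Int)) : List (List (Int × String × Int)) :=
  let st := frame_info.foldl analyzeGopStep ([], [])
  if st.2 ≠ [] then st.1 ++ [st.2] else st.1

-- ===== PORT B =====
-- split_first + loop of Source B: the GOP is the head frame plus the following run of non-I frames
def analyze_gop_alt (frame_info : List (Int × String × Int)) : List (List (Int × String × Int)) :=
  match frame_info with
  | [] => []
  | f :: rest =>
    (f :: rest.takeWhile (fun x => x.2.1 ≠ "I")) ::
      analyze_gop_alt (rest.dropWhile (fun x => x.2.1 ≠ "I"))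
termination_by frame_info.length
decreasing_by
  simp only [List.length_cons]
  exact Nat.lt_succ_of_le (List.length_dropWhile_le _ _)

-- ===== PRECONDITION & SPEC =====
def Spec_analyze_gop (frame_info : List (Int × String × Int)) (out : List (List (Int × String × Int))) : Prop := out = analyze_gop_alt frame_info
instance (frame_info : List (Int × String × Int)) (out : List (List (Int × String × Int))) : Decidable (Spec_analyze_gop frame_info out) := by unfold Spec_analyze_gop; infer_instance

-- ===== CLAIM (what is proved, stated in full; the proofs are below) =====
def Claim_equal_analyze_gop : Prop := ∀ (frame_info : List (Int × String × Int)), Dom_analyze_gop frame_info → Spec_analyze_gop frame_info (analyze_gop frame_info)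

-- ===== LEMMAS AND PROOFS =====

-- close A's final state
def analyzeGopFinish (st : List (List (Int × String × Int)) × List (Int × String × Int)) :
    List (List (Int × String × Int)) :=
  if st.2 ≠ [] then st.1 ++ [st.2] else st.1

-- reference grouping of the tail given a nonempty open group `cur`
def gopGo (cur : List (Int × String × Int)) (l : List (Int × String × Int)) :
    List (List (Int × String × Int)) :=
  match l with
  | [] => [cur]
  | f :: rest => if f.2.1 = "I" then cur :: gopGo [f] rest else gopGo (cur ++ [f]) rest

theorem foldl_step_go (l : List (Int × String × Int))
    (g : List (List (Int × String × Int))) (cur : List (Int × String × Int)) (h : cur ≠ []) :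
    analyzeGopFinish (l.foldl analyzeGopStep (g, cur)) = g ++ gopGo cur l := by
  induction l generalizing g cur with
  | nil => simp [analyzeGopFinish, gopGo, h]
  | cons f rest ih =>
    obtain ⟨n, t, sz⟩ := f
    by_cases hI : t = "I"
    · subst hI
      simp [List.foldl_cons, analyzeGopStep, gopGo, h,
        ih (g ++ [cur]) [(n, "I", sz)] (by simp)]
    · simpa [List.foldl_cons, analyzeGopStep, gopGo, hI] using
        ih g (cur ++ [(n, t, sz)]) (by simp)

theorem gopGo_eq_alt (l : List (Int × String × Int)) (cur : List (Int × String × Int)) :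
    gopGo cur l = (cur ++ l.takeWhile (fun x => x.2.1 ≠ "I")) ::
      analyze_gop_alt (l.dropWhile (fun x => x.2.1 ≠ "I")) := by
  induction l generalizing cur with
  | nil => simp [gopGo, analyze_gop_alt]
  | cons f rest ih =>
    by_cases hI : f.2.1 = "I"
    · simp only [gopGo, hI]
      rw [ih [f]]
      simp [hI, analyze_gop_alt]
    · simp only [gopGo, hI]
      rw [ih (cur ++ [f])]
      simp [hI]

-- ===== VERDICT (by name: the statement is the Claim_ definition above) =====
theorem analyze_gop_spec : Claim_equal_analyze_gop := by
  intro frame_info _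
  unfold Spec_analyze_gop
  cases frame_info with
  | nil => simp [analyze_gop, analyze_gop_alt]
  | cons f rest =>
    obtain ⟨n, t, sz⟩ := f
    have hstep : ((n, t, sz) :: rest).foldl analyzeGopStep ([], []) =
        rest.foldl analyzeGopStep ([], [(n, t, sz)]) := by
      by_cases hI : t = "I" <;> simp [List.foldl_cons, analyzeGopStep, hI]
    have : analyze_gop ((n, t, sz) :: rest) =
        analyzeGopFinish (((n, t, sz) :: rest).foldl analyzeGopStep ([], [])) := rfl
    rw [this, hstep, foldl_step_go rest [] [(n, t, sz)] (by simp), gopGo_eq_alt]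
    simp [analyze_gop_alt]
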